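-- pv_equiv track=rewrite | github.com/nammayatri/agents-platform | src/agents/providers/base.py | _truncate_tool_result
-- ===== SOURCE A (Python) =====
-- MAX_TOOL_RESULT_IN_CONTEXT = 15_000
--
-- def _truncate_tool_result(text: str) -> str:
--     """Truncate a tool result but tell the LLM what was cut and how to get more."""
--     if len(text) <= MAX_TOOL_RESULT_IN_CONTEXT:
--         return text
--     total = len(text)
--     lines = text.split("\n")
--     kept: list[str] = []
--     char_count = 0
--     for line in lines:
--         if char_count + len(line) + 1 > MAX_TOOL_RESULT_IN_CONTEXT:
--             break
--         kept.append(line)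
--         char_count += len(line) + 1
--     remaining_lines = len(lines) - len(kept)
--     result = "\n".join(kept)
--     result += (
--         f"\n\n... (showing {len(kept)} of {len(lines)} lines, {MAX_TOOL_RESULT_IN_CONTEXT} of {total} chars. "
--         f"{remaining_lines} lines not shown. "
--         f"Re-read with offset={len(kept)} if you need the rest.)"
--     )
--     return result
-- ===== SOURCE B (Python) =====
-- MAX_TOOL_RESULT_IN_CONTEXT = 15_000
--
-- def _truncate_tool_result(text: str) -> str:
--     """Truncate a tool result but tell the LLM what was cut and how to get more."""
--     if len(text) <= MAX_TOOL_RESULT_IN_CONTEXT: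
--         return text
--     lines = text.split("\n")
--     # prefix-sum of per-line costs (len(line) + 1 for the joining newline)
--     sums = []
--     acc = 0
--     for line in lines:
--         acc += len(line) + 1
--         sums.append(acc)
--     # number of leading lines whose cumulative cost stays within the limit
--     n = len([s for s in sums if s <= MAX_TOOL_RESULT_IN_CONTEXT])
--     kept = lines[:n]
--     return "\n".join(kept) + (
--         f"\n\n... (showing {n} of {len(lines)} lines, {MAX_TOOL_RESULT_IN_CONTEXT} of {len(text)} chars. "
--         f"{len(lines) - n} lines not shown. "
--         f"Re-read with offset={n} if you need the rest.)"
--     )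
-- ===== Notes on version B (the rewrite author's own statement) =====
-- stated objective: alternative
-- what changed: Replaces A's single greedy loop with break (accumulating kept lines and a running char count) by a prefix-sum array of per-line costs, a count of how many prefix sums stay within the limit, and a slice lines[:n].
import Mathlib
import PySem

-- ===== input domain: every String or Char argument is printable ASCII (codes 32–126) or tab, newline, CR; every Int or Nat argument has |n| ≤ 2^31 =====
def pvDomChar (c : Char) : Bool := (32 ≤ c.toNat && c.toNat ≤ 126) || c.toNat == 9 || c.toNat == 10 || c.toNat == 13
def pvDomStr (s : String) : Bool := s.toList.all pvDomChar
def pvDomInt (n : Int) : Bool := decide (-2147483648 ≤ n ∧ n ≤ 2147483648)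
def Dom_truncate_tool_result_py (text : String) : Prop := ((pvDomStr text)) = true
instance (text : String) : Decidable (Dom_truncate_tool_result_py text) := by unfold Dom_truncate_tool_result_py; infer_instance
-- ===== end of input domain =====

-- B replaces A's greedy break-loop by prefix sums + a count of in-limit prefixes + a slice (alternative decomposition, same cost).

-- ===== PORT A =====
-- A's for-loop with break: keep lines while char_count + len(line) + 1 stays within the limit.
def pvLoopA : Int → List (List Char) → List (List Char)
  | _, [] => []
  | cc, l :: ls =>
    if 15000 < cc + (l.length : Int) + 1 then []
    else l :: pvLoopA (cc + (l.length : Int) + 1) ls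

def truncate_tool_result_py (text : String) : String :=
  if PySem.Str.len text ≤ 15000 then text
  else
    let total := PySem.Str.len text
    let lines := PySem.Chars.splitOn text.toList ['\n']
    let kept := pvLoopA 0 lines
    let remaining : Int := (lines.length : Int) - (kept.length : Int)
    String.ofList (PySem.Chars.join ['\n'] kept
      ++ "\n\n... (showing ".toList ++ PySem.Int.toChars (kept.length : Int)
      ++ " of ".toList ++ PySem.Int.toChars (lines.length : Int)
      ++ " lines, 15000 of ".toList ++ PySem.Int.toChars total
      ++ " chars. ".toList ++ PySem.Int.toChars remaining
      ++ " lines not shown. Re-read with offset=".toList ++ PySem.Int.toChars (kept.length : Int)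
      ++ " if you need the rest.)".toList)

-- ===== PORT B =====
-- running prefix sums of the per-line costs (Source B's acc/sums loop)
def pvAccumB : Int → List Int → List Int
  | _, [] => []
  | acc, c :: cs => (acc + c) :: pvAccumB (acc + c) cs

def truncate_tool_result_py_alt (text : String) : String :=
  if PySem.Str.len text ≤ 15000 then text
  else
    let lines := PySem.Chars.splitOn text.toList ['\n']
    let sums := pvAccumB 0 (lines.map (fun l => (l.length : Int) + 1))
    -- n = len([s for s in sums if s <= MAX])
    let n := (sums.filter (fun s => decide (s ≤ 15000))).length
    -- lines[:n] with n : Nat is List.take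
    let kept := lines.take n
    String.ofList (PySem.Chars.join ['\n'] kept
      ++ "\n\n... (showing ".toList ++ PySem.Int.toChars (n : Int)
      ++ " of ".toList ++ PySem.Int.toChars (lines.length : Int)
      ++ " lines, 15000 of ".toList ++ PySem.Int.toChars (PySem.Str.len text)
      ++ " chars. ".toList ++ PySem.Int.toChars ((lines.length : Int) - (n : Int))
      ++ " lines not shown. Re-read with offset=".toList ++ PySem.Int.toChars (n : Int)
      ++ " if you need the rest.)".toList)

-- ===== PRECONDITION & SPEC =====
def Spec_truncate_tool_result_py (text : String) (out : String) : Prop := out = truncate_tool_result_py_alt text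
instance (text : String) (out : String) : Decidable (Spec_truncate_tool_result_py text out) := by unfold Spec_truncate_tool_result_py; infer_instance

-- ===== CLAIM (what is proved, stated in full; the proofs are below) =====
def Claim_equal_truncate_tool_result_py : Prop := ∀ (text : String), Dom_truncate_tool_result_py text → Spec_truncate_tool_result_py text (truncate_tool_result_py text)

-- ===== LEMMAS AND PROOFS =====

theorem pvAccumB_length (a : Int) (cs : List Int) : (pvAccumB a cs).length = cs.length := by
  induction cs generalizing a with
  | nil => rfl
  | cons c cs ih => simp [pvAccumB, ih]

theorem pvAccumB_lb (a : Int) (cs : List Int) (h : ∀ c ∈ cs, 0 ≤ c) :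
    ∀ x ∈ pvAccumB a cs, a ≤ x := by
  induction cs generalizing a with
  | nil => simp [pvAccumB]
  | cons c cs ih =>
    intro x hx
    simp only [pvAccumB, List.mem_cons] at hx
    have hc : 0 ≤ c := h c (by simp)
    rcases hx with rfl | hx
    · omega
    · have := ih (a + c) (fun d hd => h d (by simp [hd])) x hx
      omega

theorem pvLoopA_eq_take (ls : List (List Char)) (cc : Int) :
    pvLoopA cc ls =
      ls.take ((pvAccumB cc (ls.map (fun l => (l.length : Int) + 1))).filter
        (fun s => decide (s ≤ 15000))).length := by
  induction ls generalizing cc with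
  | nil => rfl
  | cons l ls ih =>
    simp only [pvLoopA, List.map_cons, pvAccumB]
    by_cases h : 15000 < cc + (l.length : Int) + 1
    · rw [if_pos h]
      have hall : ∀ x ∈ pvAccumB (cc + ((l.length : Int) + 1))
          (ls.map (fun l => (l.length : Int) + 1)), ¬ x ≤ 15000 := by
        intro x hx
        have := pvAccumB_lb (cc + ((l.length : Int) + 1))
          (ls.map (fun l => (l.length : Int) + 1))
          (by intro c hc; simp only [List.mem_map] at hc; obtain ⟨m, _, rfl⟩ := hc; positivity)
          x hx
        omega
      have hfilt : (pvAccumB (cc + ((l.length : Int) + 1))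
          (ls.map (fun l => (l.length : Int) + 1))).filter (fun s => decide (s ≤ 15000)) = [] := by
        rw [List.filter_eq_nil_iff]
        intro x hx
        simpa using hall x hx
      rw [List.filter_cons]
      have : ¬ (cc + ((l.length : Int) + 1) ≤ 15000) := by omega
      simp [this, hfilt]
    · rw [if_neg h]
      rw [List.filter_cons]
      have hle : cc + ((l.length : Int) + 1) ≤ 15000 := by omega
      simp only [hle, decide_true, if_pos, List.length_cons, List.take_succ_cons]
      have := ih (cc + (l.length : Int) + 1)
      rw [this]
      ring_nf

theorem pvTake_length (ls : List (List Char)) :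
    (ls.take ((pvAccumB 0 (ls.map (fun l => (l.length : Int) + 1))).filter
        (fun s => decide (s ≤ 15000))).length).length =
      ((pvAccumB 0 (ls.map (fun l => (l.length : Int) + 1))).filter
        (fun s => decide (s ≤ 15000))).length := by
  rw [List.length_take]
  have h1 : ((pvAccumB 0 (ls.map (fun l => (l.length : Int) + 1))).filter
      (fun s => decide (s ≤ 15000))).length ≤ ls.length := by
    calc _ ≤ (pvAccumB 0 (ls.map (fun l => (l.length : Int) + 1))).length :=
            List.length_filter_le _ _
      _ = ls.length := by rw [pvAccumB_length, List.length_map]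
  omega

-- ===== VERDICT (by name: the statement is the Claim_ definition above) =====
theorem truncate_tool_result_py_spec : Claim_equal_truncate_tool_result_py := by
  intro text _
  unfold Spec_truncate_tool_result_py truncate_tool_result_py truncate_tool_result_py_alt
  by_cases h : PySem.Str.len text ≤ 15000
  · rw [if_pos h, if_pos h]
  · rw [if_neg h, if_neg h]
    simp only [pvLoopA_eq_take, pvTake_length]
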